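-- pv_equiv track=rewrite | github.com/Manojbhat09/audio2text2audio | finetune/scripts/test_trained_model.py | _create_confusion_matrix
-- ===== SOURCE A (Python) =====
-- from typing import Dict, List, Tuple
--
-- def _create_confusion_matrix(predictions: List[str], ground_truth: List[str]) -> Dict:
--     """Create confusion matrix."""
--     datasets = sorted(set(predictions + ground_truth))
--     matrix = {}
--
--     for true_dataset in datasets:
--         matrix[true_dataset] = {}
--         for pred_dataset in datasets:
--             count = sum(1 for p, g in zip(predictions, ground_truth)
--                        if g == true_dataset and p == pred_dataset)
--             matrix[true_dataset][pred_dataset] = count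
--
--     return matrix
-- ===== SOURCE B (Python) =====
-- from typing import Dict, List
--
-- def _create_confusion_matrix(predictions: List[str], ground_truth: List[str]) -> Dict:
--     """Create confusion matrix (one-pass pair counting, then d x d fill)."""
--     datasets = sorted(set(predictions + ground_truth))
--     counts = {}
--     for p, g in zip(predictions, ground_truth):
--         counts[(g, p)] = counts.get((g, p), 0) + 1
--     return {t: {p: counts.get((t, p), 0) for p in datasets} for t in datasets}
-- ===== Notes on version B (the rewrite author's own statement) =====
-- stated objective: faster
-- what changed: Instead of rescanning the whole zipped prediction/truth list for every (true,pred) cell, B counts (truth,pred) pairs in one pass into a dict and fills the d x d matrix with constant-time lookups.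
import Mathlib
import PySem

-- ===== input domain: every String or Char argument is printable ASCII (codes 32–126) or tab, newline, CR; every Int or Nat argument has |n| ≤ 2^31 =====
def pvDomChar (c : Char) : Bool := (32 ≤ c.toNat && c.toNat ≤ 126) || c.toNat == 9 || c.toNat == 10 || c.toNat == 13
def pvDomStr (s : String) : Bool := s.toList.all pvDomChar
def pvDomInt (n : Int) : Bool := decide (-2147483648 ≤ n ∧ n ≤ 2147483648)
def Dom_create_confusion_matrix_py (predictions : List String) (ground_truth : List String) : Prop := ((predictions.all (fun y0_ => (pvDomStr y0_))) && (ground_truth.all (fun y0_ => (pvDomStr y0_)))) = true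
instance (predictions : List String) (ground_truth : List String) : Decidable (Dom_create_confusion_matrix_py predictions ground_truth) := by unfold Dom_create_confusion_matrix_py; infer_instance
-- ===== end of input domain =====

-- ===== PORT A =====
-- B changes what A does: one-pass (truth,pred) pair counting replaces the per-cell rescans (objective: faster, asymptotic).
-- count = sum(1 for p, g in zip(predictions, ground_truth) if g == true_dataset and p == pred_dataset)
def pvCountA (predictions : List String) (ground_truth : List String) (t p : String) : Int :=
  (predictions.zip ground_truth).foldl
    (fun c x => if x.2 == t && x.1 == p then c + 1 else c) 0

def create_confusion_matrix_py (predictions : List String) (ground_truth : List String) : List (String × List (String × Int)) :=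
  let datasets := PySem.List.sorted (PySem.Set.ofList (predictions ++ ground_truth)) (fun x => x) false
  let matrix : PySem.Dict String (PySem.Dict String Int) :=
    datasets.foldl (fun matrix true_dataset =>
      -- matrix[true_dataset] = {}
      let matrix := matrix.insert true_dataset PySem.Dict.empty
      -- for pred_dataset in datasets: matrix[true_dataset][pred_dataset] = count
      datasets.foldl (fun matrix pred_dataset =>
        matrix.modify true_dataset PySem.Dict.empty
          (fun row => row.insert pred_dataset (pvCountA predictions ground_truth true_dataset pred_dataset)))
        matrix)
      PySem.Dict.empty
  matrix.items.map (fun kv => (kv.1, kv.2.items))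

-- ===== PORT B =====
def create_confusion_matrix_py_alt (predictions : List String) (ground_truth : List String) : List (String × List (String × Int)) :=
  let datasets := PySem.List.sorted (PySem.Set.ofList (predictions ++ ground_truth)) (fun x => x) false
  -- counts[(g, p)] = counts.get((g, p), 0) + 1
  let counts : PySem.Dict (String × String) Int :=
    (predictions.zip ground_truth).foldl
      (fun d x => d.insert (x.2, x.1) (d.getD (x.2, x.1) 0 + 1)) PySem.Dict.empty
  datasets.map (fun t => (t, datasets.map (fun p => (p, counts.getD (t, p) 0))))

-- ===== PRECONDITION & SPEC =====
def Spec_create_confusion_matrix_py (predictions : List String) (ground_truth : List String) (out : List (String × List (String × Int))) : Prop := out = create_confusion_matrix_py_alt predictions ground_truth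
instance (predictions : List String) (ground_truth : List String) (out : List (String × List (String × Int))) : Decidable (Spec_create_confusion_matrix_py predictions ground_truth out) := by unfold Spec_create_confusion_matrix_py; infer_instance

-- ===== CLAIM (what is proved, stated in full; the proofs are below) =====
def Claim_equal_create_confusion_matrix_py : Prop := ∀ (predictions : List String) (ground_truth : List String), Dom_create_confusion_matrix_py predictions ground_truth → Spec_create_confusion_matrix_py predictions ground_truth (create_confusion_matrix_py predictions ground_truth)

-- ===== LEMMAS AND PROOFS =====

-- A's per-cell rescan equals the count of the swapped pair in the zipped list.
theorem pvCountA_eq_count (predictions ground_truth : List String) (t p : String) :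
    pvCountA predictions ground_truth t p
      = ((predictions.zip ground_truth).map (fun x => (x.2, x.1))).count (t, p) := by
  unfold pvCountA
  rw [PySem.List.foldl_count_if (fun x => x.2 == t && x.1 == p) (predictions.zip ground_truth) 0]
  rw [List.count, List.countP_map, zero_add]
  congr 1

-- B's counter lookup equals the same count.
theorem pvCounts_getD (predictions ground_truth : List String) (t p : String) :
    ((predictions.zip ground_truth).foldl
        (fun d x => d.insert (x.2, x.1) (d.getD (x.2, x.1) 0 + 1))
        (PySem.Dict.empty : PySem.Dict (String × String) Int)).getD (t, p) 0
      = ((predictions.zip ground_truth).map (fun x => (x.2, x.1))).count (t, p) := by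
  rw [show (List.foldl (fun (d : PySem.Dict (String × String) Int) (x : String × String) =>
        d.insert (x.2, x.1) (d.getD (x.2, x.1) 0 + 1)) PySem.Dict.empty (predictions.zip ground_truth))
      = List.foldl (fun d y => d.insert y (d.getD y 0 + 1)) PySem.Dict.empty
          ((predictions.zip ground_truth).map (fun x => (x.2, x.1))) from
    (@List.foldl_map _ _ _ (fun x : String × String => (x.2, x.1))
      (fun d y => PySem.Dict.insert d y (d.getD y 0 + 1)) _ _).symm]
  rw [PySem.Dict.getD_foldl_insert_add_one]
  simp

-- A's inner loop (repeated matrix[t][p] = …) collapses to inserting the row built on its own.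
theorem pvInner_collapse (l : List String) (m : PySem.Dict String (PySem.Dict String Int))
    (t : String) (c : String → Int) (row : PySem.Dict String Int) :
    l.foldl (fun matrix p =>
        matrix.modify t PySem.Dict.empty (fun r => r.insert p (c p)))
      (m.insert t row)
      = m.insert t (l.foldl (fun r p => r.insert p (c p)) row) := by
  induction l generalizing row with
  | nil => rfl
  | cons p rest ih =>
      simp only [List.foldl_cons]
      rw [show (m.insert t row).modify t PySem.Dict.empty (fun r => r.insert p (c p))
            = (m.insert t row).insert t (row.insert p (c p)) by
          simp [PySem.Dict.modify, PySem.Dict.getD_insert_self]]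
      rw [PySem.Dict.insert_insert_self, ih]

theorem create_confusion_matrix_py_spec : Claim_equal_create_confusion_matrix_py := by
  intro predictions ground_truth _
  unfold Spec_create_confusion_matrix_py
  unfold create_confusion_matrix_py create_confusion_matrix_py_alt
  simp only []
  set datasets := PySem.List.sorted (PySem.Set.ofList (predictions ++ ground_truth)) (fun x => x) false with hds
  have hnd : datasets.Nodup :=
    (PySem.List.sorted_ofList_pairwise_lt (predictions ++ ground_truth)).nodup
  -- collapse A's inner loops
  have h1 : ∀ (m : PySem.Dict String (PySem.Dict String Int)) t,
      datasets.foldl (fun matrix p =>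
          matrix.modify t PySem.Dict.empty
            (fun r => r.insert p (pvCountA predictions ground_truth t p)))
        (m.insert t PySem.Dict.empty)
        = m.insert t (datasets.foldl
            (fun r p => r.insert p (pvCountA predictions ground_truth t p)) PySem.Dict.empty) := by
    intro m t
    exact pvInner_collapse datasets m t _ PySem.Dict.empty
  simp only [h1]
  -- outer loop over fresh distinct keys appends
  rw [PySem.Dict.items_foldl_insert_fresh datasets (fun t => t)
        (fun t => datasets.foldl
          (fun r p => r.insert p (pvCountA predictions ground_truth t p)) PySem.Dict.empty)
        PySem.Dict.empty (by simp) (by simpa using hnd)]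
  simp only [show (PySem.Dict.empty : PySem.Dict String (PySem.Dict String Int)).items = [] from rfl,
    List.nil_append, List.map_map]
  refine List.map_congr_left (fun t _ => ?_)
  simp only [Function.comp]
  congr 1
  -- inner rows: fresh distinct keys append
  rw [PySem.Dict.items_foldl_insert_fresh datasets (fun p => p)
        (fun p => pvCountA predictions ground_truth t p)
        PySem.Dict.empty (by simp) (by simpa using hnd)]
  simp only [show (PySem.Dict.empty : PySem.Dict String Int).items = [] from rfl, List.nil_append]
  refine List.map_congr_left (fun p _ => ?_)
  rw [pvCountA_eq_count, pvCounts_getD]
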